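-- pv_equiv track=rewrite | github.com/MattMorris1996/PythonPoker | ScoreHand.py | score_four_a_kind
-- ===== SOURCE A (Python) =====
-- def score_four_a_kind(hand):
--     vals = list(map(lambda x: x[0], hand))
--     checked = set()
--     score = 0
--     for val in vals:
--         if vals.count(val) == 4 and val not in checked:
--             score += val * 13
--             checked.add(val)
--         elif val not in checked:
--             score += val
--             checked.add(val)
--     return score
-- ===== SOURCE B (Python) =====
-- def score_four_a_kind(hand):
--     s = sorted(v for v, _ in hand)
--     score = 0
--     i = 0
--     while i < len(s):
--         j = i + 1
--         while j < len(s) and s[j] == s[i]: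
--             j += 1
--         score += s[i] * 13 if j - i == 4 else s[i]
--         i = j
--     return score
-- ===== Notes on version B (the rewrite author's own statement) =====
-- stated objective: alternative
-- what changed: Sorts the values and scans runs of equal values once (sort-then-run-length-scan), adding val*13 for a run of exactly 4 and val otherwise, instead of A's per-element vals.count rescans guarded by a 'checked' dedup set.
import Mathlib
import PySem

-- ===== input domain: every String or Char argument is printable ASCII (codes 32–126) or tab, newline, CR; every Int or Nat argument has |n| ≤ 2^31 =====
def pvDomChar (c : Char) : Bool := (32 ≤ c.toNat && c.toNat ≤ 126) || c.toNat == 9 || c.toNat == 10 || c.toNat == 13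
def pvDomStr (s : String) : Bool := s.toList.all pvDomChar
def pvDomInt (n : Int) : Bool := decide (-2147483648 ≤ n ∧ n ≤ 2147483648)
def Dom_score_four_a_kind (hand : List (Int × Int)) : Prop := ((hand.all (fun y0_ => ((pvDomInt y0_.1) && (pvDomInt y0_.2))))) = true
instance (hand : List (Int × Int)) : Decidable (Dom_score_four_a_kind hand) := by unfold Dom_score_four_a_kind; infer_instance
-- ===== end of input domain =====

-- B sorts the values and scans runs of equal values once (val*13 for a run of exactly 4,
-- else val), replacing A's per-element vals.count rescans and 'checked' dedup set.

-- ===== PORT A =====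
-- A-side helper: the loop body of A's 'for val in vals' loop (c val = 'vals.count(val) == 4')
def pvStepA (c : Int → Bool) (st : PySem.Set Int × Int) (val : Int) : PySem.Set Int × Int :=
  if c val && !(PySem.Set.contains st.1 val) then
    (PySem.Set.add st.1 val, st.2 + val * 13)
  else if !(PySem.Set.contains st.1 val) then
    (PySem.Set.add st.1 val, st.2 + val)
  else st

def score_four_a_kind (hand : List (Int × Int)) : Int :=
  let vals := hand.map (fun x => x.1)
  let res := vals.foldl (pvStepA (fun val => PySem.List.count vals val == 4))
    (PySem.Set.empty, 0)
  res.2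

-- ===== PORT B =====
-- B-side helper: the outer 'while i < len(s)' loop of Source B; the inner 'while' that
-- advances j over the run of s[i] is the takeWhile, and 'i = j' is the dropWhile.
def pvRunsB : List Int → Int
  | [] => 0
  | v :: t =>
      let run := 1 + (t.takeWhile (fun x => x == v)).length
      (if run == 4 then v * 13 else v) + pvRunsB (t.dropWhile (fun x => x == v))
termination_by l => l.length
decreasing_by
  simpa using Nat.lt_succ_of_le (t.length_dropWhile_le _)

def score_four_a_kind_alt (hand : List (Int × Int)) : Int :=
  pvRunsB (PySem.List.sorted (hand.map (fun x => x.1)) (fun x => x) false)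

-- ===== PRECONDITION & SPEC =====
def Spec_score_four_a_kind (hand : List (Int × Int)) (out : Int) : Prop := out = score_four_a_kind_alt hand
instance (hand : List (Int × Int)) (out : Int) : Decidable (Spec_score_four_a_kind hand out) := by unfold Spec_score_four_a_kind; infer_instance

-- ===== CLAIM (what is proved, stated in full; the proofs are below) =====
def Claim_equal_score_four_a_kind : Prop := ∀ (hand : List (Int × Int)), Dom_score_four_a_kind hand → Spec_score_four_a_kind hand (score_four_a_kind hand)

-- ===== LEMMAS AND PROOFS =====

-- canonical value both programs compute: sum over the distinct values k of l of
-- (k*13 if l.count k = 4 else k)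
def pvF (l : List Int) (k : Int) : Int := if l.count k = 4 then k * 13 else k

def pvSumF (l : List Int) : Int := ((PySem.Set.ofList l).map (pvF l)).sum

-- distinct-new-elements sum: what A's loop computes, recursion following A's traversal
def pvG (c : Int → Bool) (s : PySem.Set Int) : List Int → Int
  | [] => 0
  | v :: t =>
      if v ∈ s then pvG c s t
      else (if c v then v * 13 else v) + pvG c (PySem.Set.add s v) t

theorem pvStepA_eq (c : Int → Bool) (s : PySem.Set Int) (acc : Int) (v : Int) :
    pvStepA c (s, acc) v =
      if v ∈ s then (s, acc)
      else (PySem.Set.add s v, acc + (if c v then v * 13 else v)) := by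
  by_cases hv : v ∈ s <;> by_cases hc : c v <;>
    simp [pvStepA, hv, hc]

theorem pvLoopA (c : Int → Bool) (l : List Int) (s : PySem.Set Int) (acc : Int) :
    (l.foldl (pvStepA c) (s, acc)).2 = acc + pvG c s l := by
  induction l generalizing s acc with
  | nil => simp [pvG]
  | cons v t ih =>
      rw [List.foldl_cons, pvStepA_eq]
      by_cases hv : v ∈ s
      · rw [if_pos hv, ih]
        simp only [pvG, if_pos hv]
      · rw [if_neg hv, ih]
        simp only [pvG, if_neg hv]
        ring

theorem pvGsum (c : Int → Bool) (l : List Int) (s : PySem.Set Int) :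
    pvG c s l =
      (((PySem.Set.ofList l).filter (fun v => !(PySem.Set.contains s v))).map
        (fun k => if c k then k * 13 else k)).sum := by
  induction l generalizing s with
  | nil => simp [pvG, PySem.Set.ofList_nil]
  | cons v t ih =>
      rw [PySem.Set.ofList_cons]
      by_cases hv : v ∈ s
      · have hfil : (((PySem.Set.ofList t).discard v).filter (fun y => !decide (y ∈ s))) =
            ((PySem.Set.ofList t).filter (fun y => !decide (y ∈ s))) := by
          rw [PySem.Set.discard, List.filter_filter]
          apply List.filter_congr
          intro y _
          by_cases hy : y ∈ s
          · simp [hy]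
          · have hne : y ≠ v := fun h => hy (h ▸ hv)
            simp [hy, hne]
        simp [pvG, if_pos hv, ih, List.filter_cons]
        rw [hfil]
      · have hfil : ((PySem.Set.discard (PySem.Set.ofList t) v).filter
            (fun y => !(PySem.Set.contains s y))) =
            ((PySem.Set.ofList t).filter (fun y => !(PySem.Set.contains (PySem.Set.add s v) y))) := by
          rw [PySem.Set.discard, List.filter_filter]
          apply List.filter_congr
          intro y _
          by_cases hyv : y = v
          · subst hyv
            simp [PySem.Set.mem_add]
          · by_cases hy : y ∈ s <;>
              simp [PySem.Set.mem_add, hyv, hy]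
        have hvc : PySem.Set.contains s v = false := by
          simp [hv]
        simp only [pvG, if_neg hv, ih, List.filter_cons, hvc, Bool.not_false, if_pos,
          List.map_cons, List.sum_cons, hfil]

-- A computes pvSumF of its value list
theorem pvA_eq (hand : List (Int × Int)) :
    score_four_a_kind hand = pvSumF (hand.map (fun x => x.1)) := by
  unfold score_four_a_kind pvSumF
  set vals := hand.map (fun x => x.1) with hvals
  rw [pvLoopA, pvGsum]
  simp [PySem.Set.empty, PySem.List.count]
  refine congrArg List.sum (List.map_congr_left ?_)
  intro k _
  norm_cast

-- elements surviving the dropWhile of a sorted run are strictly greater than the run value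
theorem pv_dropWhile_gt (v : Int) (t : List Int) (h : (v :: t).Pairwise (· ≤ ·)) :
    ∀ x ∈ t.dropWhile (fun x => x == v), v < x := by
  induction t with
  | nil => simp
  | cons a t ih =>
      intro x hx
      rcases List.pairwise_cons.1 h with ⟨hva, hat⟩
      by_cases hav : a = v
      · subst hav
        rw [List.dropWhile_cons_of_pos (by simp)] at hx
        exact ih (List.pairwise_cons.2 ⟨fun y hy => (List.pairwise_cons.1 hat).1 y hy, (List.pairwise_cons.1 hat).2⟩) x hx
      · rw [List.dropWhile_cons_of_neg (by simp [hav])] at hx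
        have hva' : v < a := lt_of_le_of_ne (hva a (by simp)) (fun h => hav h.symm)
        rcases List.mem_cons.1 hx with h1 | h1
        · exact h1 ▸ hva'
        · exact lt_of_lt_of_le hva' ((List.pairwise_cons.1 hat).1 x h1)

-- ofList of a run: v followed by copies of v and then elements ≠ v
theorem pv_ofList_wd (v : Int) (w d : List Int) (hw : ∀ x ∈ w, x = v) (hd : ∀ x ∈ d, x ≠ v) :
    PySem.Set.ofList (v :: (w ++ d)) = v :: PySem.Set.ofList d := by
  induction w with
  | nil =>
      rw [List.nil_append, PySem.Set.ofList_cons]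
      congr 1
      simp only [PySem.Set.discard]
      refine List.filter_eq_self.2 ?_
      intro a ha
      simpa using hd a ((PySem.Set.mem_ofList _ _).1 ha)
  | cons a w' ih =>
      have hav : a = v := hw a (by simp)
      subst hav
      have h1 : PySem.Set.ofList (a :: (w' ++ d)) = a :: PySem.Set.ofList d :=
        ih (fun x hx => hw x (by simp [hx]))
      rw [List.cons_append, PySem.Set.ofList_cons, PySem.Set.ofList_cons] at *
      rw [h1]
      congr 1
      simp only [PySem.Set.discard, List.filter_cons]
      simp
      intro x hx
      exact hd x hx

-- pvRunsB on a sorted list computes pvSumF (strong induction on a length bound)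
theorem pvB_eq_aux (n : Nat) : ∀ l : List Int, l.length ≤ n → l.Pairwise (· ≤ ·) →
    pvRunsB l = pvSumF l := by
  induction n with
  | zero =>
      intro l hl _
      rw [List.length_eq_zero_iff.1 (Nat.le_zero.1 hl)]
      simp [pvRunsB, pvSumF, PySem.Set.ofList_nil]
  | succ n ih =>
      intro l hl h
      cases l with
      | nil => simp [pvRunsB, pvSumF, PySem.Set.ofList_nil]
      | cons v t =>
          set w := t.takeWhile (fun x => x == v) with hw_def
          set d := t.dropWhile (fun x => x == v) with hd_def
          have hw : ∀ x ∈ w, x = v := by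
            intro x hx
            simpa using List.mem_takeWhile_imp hx
          have hgt : ∀ x ∈ d, v < x := pv_dropWhile_gt v t h
          have hd : ∀ x ∈ d, x ≠ v := fun x hx => (hgt x hx).ne'
          have htwd : t = w ++ d := (t.takeWhile_append_dropWhile).symm
          have hdp : d.Pairwise (· ≤ ·) :=
            (List.pairwise_cons.1 h).2.sublist (List.dropWhile_sublist _)
          have hdlen : d.length ≤ n := by
            have h2 := t.length_dropWhile_le (fun x => x == v)
            rw [← hd_def] at h2
            simp at hl
            omega
          have ihd := ih d hdlen hdp
          have hof : PySem.Set.ofList (v :: t) = v :: PySem.Set.ofList d := by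
            conv_lhs => rw [htwd]
            exact pv_ofList_wd v w d hw hd
          have hcw : w.count v = w.length :=
            List.count_eq_length.2 (fun b hb => (hw b hb).symm)
          have hcd0 : d.count v = 0 :=
            List.count_eq_zero.2 (fun hv => hd v hv rfl)
          have hcv : (v :: t).count v = 1 + w.length := by
            rw [htwd, List.count_cons_self, List.count_append, hcw, hcd0]
            omega
          have hck : ∀ k ∈ d, (v :: t).count k = d.count k := by
            intro k hk
            have hkv : k ≠ v := hd k hk
            have hcwk : w.count k = 0 :=
              List.count_eq_zero.2 (fun hkw => hkv (hw k hkw))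
            rw [htwd, List.count_cons_of_ne hkv.symm, List.count_append, hcwk]
            omega
          rw [pvRunsB]
          simp only [← hw_def, ← hd_def]
          conv_rhs => rw [pvSumF, hof, List.map_cons, List.sum_cons]
          have hhead : pvF (v :: t) v = (if (1 + w.length == 4) then v * 13 else v) := by
            rw [pvF, hcv]
            by_cases h4 : 1 + w.length = 4 <;> simp [h4]
          have htail : (PySem.Set.ofList d).map (pvF (v :: t)) = (PySem.Set.ofList d).map (pvF d) := by
            refine List.map_congr_left ?_
            intro k hk
            rw [pvF, pvF, hck k ((PySem.Set.mem_ofList _ _).1 hk)]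
          rw [hhead, htail, ihd]
          simp [pvSumF]

theorem pvB_eq (l : List Int) (h : l.Pairwise (· ≤ ·)) : pvRunsB l = pvSumF l :=
  pvB_eq_aux l.length l le_rfl h

-- pvSumF is invariant under permutation
theorem pvSumF_perm (l l' : List Int) (h : l.Perm l') : pvSumF l = pvSumF l' := by
  have hcnt : pvF l = pvF l' := by
    funext k
    unfold pvF
    rw [h.count_eq]
  have hperm : (PySem.Set.ofList l).Perm (PySem.Set.ofList l') := by
    rw [List.perm_ext_iff_of_nodup (PySem.Set.nodup_ofList _) (PySem.Set.nodup_ofList _)]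
    intro a
    rw [PySem.Set.mem_ofList, PySem.Set.mem_ofList]
    exact ⟨fun ha => h.mem_iff.1 ha, fun ha => h.mem_iff.2 ha⟩
  rw [pvSumF, pvSumF, hcnt]
  exact (hperm.map (pvF l')).sum_eq

-- ===== VERDICT (by name: the statement is the Claim_ definition above) =====
theorem score_four_a_kind_spec : Claim_equal_score_four_a_kind := by
  intro hand _
  unfold Spec_score_four_a_kind score_four_a_kind_alt
  rw [pvA_eq, pvB_eq _ (PySem.List.sorted_pairwise _ _),
      pvSumF_perm _ _ (PySem.List.sorted_perm _ _ _)]
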